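-- pv_equiv track=rewrite | github.com/KOSFin/nagient | src/nagient/cli.py | _transport_test_status
-- ===== SOURCE A (Python) =====
-- from collections.abc import Callable, Mapping, Sequence
--
-- def _transport_test_status(
--     transports: list[dict[str, object]],
--     issues: Sequence[object],
-- ) -> str:
--     statuses = {_normalized_status(item.get("status")) for item in transports}
--     if statuses == {"disabled"}:
--         return "disabled"
--
--     if any(_as_text(_as_dict(issue).get("severity")) == "error" for issue in issues):
--         return "failed"
--     if any(_as_text(_as_dict(issue).get("severity")) == "warning" for issue in issues):
--         return "degraded"
--     if "failed" in statuses: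
--         return "failed"
--     if "degraded" in statuses:
--         return "degraded"
--     if "ready" in statuses:
--         return "ready"
--     return "unknown"
--
-- def _normalized_status(value: object) -> str:
--     return _as_text(value).strip().lower()
--
-- def _as_dict(value: object) -> dict[str, object]:
--     if not isinstance(value, dict):
--         return {}
--     return {str(key): item for key, item in value.items()}
--
-- def _as_text(value: object) -> str:
--     if value is None:
--         return ""
--     return str(value)
-- ===== SOURCE B (Python) =====
-- # B: single max-rank accumulator over a priority table instead of an early-return chain of scans.
-- _STATUS_RANK = {"failed": 3, "degraded": 2, "ready": 1}
-- _RESULT = ("unknown", "ready", "degraded", "failed", "degraded", "failed")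
--
-- def _transport_test_status(transports, issues):
--     statuses = [_normalized_status(item.get("status")) for item in transports]
--     if statuses and all(s == "disabled" for s in statuses):
--         return "disabled"
--     rank = 0
--     for issue in issues:
--         sev = _as_text(_as_dict(issue).get("severity"))
--         if sev == "error":
--             rank = max(rank, 5)
--         elif sev == "warning":
--             rank = max(rank, 4)
--     for s in statuses:
--         rank = max(rank, _STATUS_RANK.get(s, 0))
--     return _RESULT[rank]
--
-- def _normalized_status(value):
--     return _as_text(value).strip().lower()
--
-- def _as_dict(value):
--     if not isinstance(value, dict):
--         return {}
--     return {str(key): item for key, item in value.items()}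
--
-- def _as_text(value):
--     if value is None:
--         return ""
--     return str(value)
-- ===== Notes on version B (the rewrite author's own statement) =====
-- stated objective: alternative
-- what changed: B replaces the early-return chain of set-equality and any(...) scans with a single numeric max-rank accumulator (error=5, warning=4, failed=3, degraded=2, ready=1) over issues then statuses, and reads the answer out of a fixed priority table; the disabled case becomes a nonempty+all test on the status list instead of set equality.
import Mathlib
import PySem

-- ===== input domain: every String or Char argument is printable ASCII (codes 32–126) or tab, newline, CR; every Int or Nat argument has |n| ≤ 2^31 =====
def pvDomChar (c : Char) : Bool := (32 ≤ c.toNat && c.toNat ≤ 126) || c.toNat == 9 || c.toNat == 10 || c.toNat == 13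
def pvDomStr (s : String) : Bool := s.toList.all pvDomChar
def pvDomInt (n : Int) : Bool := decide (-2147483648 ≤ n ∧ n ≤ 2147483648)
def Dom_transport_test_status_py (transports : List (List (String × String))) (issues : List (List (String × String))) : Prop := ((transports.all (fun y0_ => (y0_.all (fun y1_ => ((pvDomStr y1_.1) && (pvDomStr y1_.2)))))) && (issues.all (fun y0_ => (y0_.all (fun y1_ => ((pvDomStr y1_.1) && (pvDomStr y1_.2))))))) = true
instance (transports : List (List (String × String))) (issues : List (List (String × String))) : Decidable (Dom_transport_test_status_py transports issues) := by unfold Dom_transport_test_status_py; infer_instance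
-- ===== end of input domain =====

-- B replaces the early-return chain of scans by a single max-rank accumulator read out of a fixed priority table (same cost, different decomposition).


-- ===== PORT A =====
-- _as_text(value): None -> "", else the string itself (values here are strings)
def pvAsText (v : Option String) : String := v.getD ""

-- _normalized_status(value) = _as_text(value).strip().lower()
def pvNormStatus (v : Option String) : String := PySem.Str.lower (PySem.Str.strip (pvAsText v))

-- _as_dict is the identity on these string-keyed dicts; issue severity as text
def pvSeverity (issue : List (String × String)) : String :=
  pvAsText ((PySem.Dict.mk issue).get? "severity")

def transport_test_status_py (transports : List (List (String × String))) (issues : List (List (String × String))) : String :=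
  let statuses : PySem.Set String :=
    PySem.Set.ofList (transports.map (fun item => pvNormStatus ((PySem.Dict.mk item).get? "status")))
  if PySem.Set.equal statuses (PySem.Set.ofList ["disabled"]) then "disabled"
  else if issues.any (fun issue => pvSeverity issue == "error") then "failed"
  else if issues.any (fun issue => pvSeverity issue == "warning") then "degraded"
  else if PySem.Set.contains statuses "failed" then "failed"
  else if PySem.Set.contains statuses "degraded" then "degraded"
  else if PySem.Set.contains statuses "ready" then "ready"
  else "unknown"

-- ===== PORT B =====
def pvStatusRankDict : PySem.Dict String Int :=
  PySem.Dict.mk [("failed", 3), ("degraded", 2), ("ready", 1)]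

def pvResultTable : List String := ["unknown", "ready", "degraded", "failed", "degraded", "failed"]

def transport_test_status_py_alt (transports : List (List (String × String))) (issues : List (List (String × String))) : String :=
  let statuses : List String :=
    transports.map (fun item => pvNormStatus ((PySem.Dict.mk item).get? "status"))
  if !statuses.isEmpty && statuses.all (fun s => s == "disabled") then "disabled"
  else
    let rank1 : Int := issues.foldl (fun a issue =>
      let sev := pvSeverity issue
      if sev == "error" then max a 5 else if sev == "warning" then max a 4 else a) 0
    let rank : Int := statuses.foldl (fun a s => max a (pvStatusRankDict.getD s 0)) rank1
    (PySem.List.pyGet? pvResultTable rank).getD "unknown"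

-- ===== PRECONDITION & SPEC =====
def Spec_transport_test_status_py (transports : List (List (String × String))) (issues : List (List (String × String))) (out : String) : Prop := out = transport_test_status_py_alt transports issues
instance (transports : List (List (String × String))) (issues : List (List (String × String))) (out : String) : Decidable (Spec_transport_test_status_py transports issues out) := by unfold Spec_transport_test_status_py; infer_instance

-- ===== CLAIM (what is proved, stated in full; the proofs are below) =====
def Claim_equal_transport_test_status_py : Prop := ∀ (transports : List (List (String × String))) (issues : List (List (String × String))), Dom_transport_test_status_py transports issues → Spec_transport_test_status_py transports issues (transport_test_status_py transports issues)

-- ===== LEMMAS AND PROOFS =====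

-- set(l) == {"disabled"} iff l is nonempty and all-"disabled"
theorem pv_equal_disabled (l : List String) :
    PySem.Set.equal (PySem.Set.ofList l) (PySem.Set.ofList ["disabled"]) =
      (!l.isEmpty && l.all (fun s => s == "disabled")) := by
  rw [Bool.eq_iff_iff]
  simp only [PySem.Set.equal_iff, PySem.Set.mem_ofList, Bool.and_eq_true, Bool.not_eq_eq_eq_not,
    Bool.not_true, List.isEmpty_eq_false_iff, List.all_eq_true, beq_iff_eq, List.mem_singleton]
  constructor
  · intro h
    have hd : "disabled" ∈ l := (h "disabled").mpr rfl
    exact ⟨fun hnil => by simp [hnil] at hd, fun x hx => (h x).mp hx⟩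
  · rintro ⟨hne, hall⟩ x
    constructor
    · exact fun hx => hall x hx
    · rintro rfl
      cases l with
      | nil => exact absurd rfl hne
      | cons y ys => have := hall y (by simp); simp [this]

theorem pv_contains_ofList {l : List String} {x : String} :
    PySem.Set.contains (PySem.Set.ofList l) x = l.any (fun y => y == x) := by
  rw [Bool.eq_iff_iff]
  simp only [PySem.Set.contains_iff, PySem.Set.mem_ofList, List.any_eq_true, beq_iff_eq]
  constructor
  · exact fun h => ⟨x, h, rfl⟩
  · rintro ⟨y, hy, rfl⟩; exact hy

-- the issues fold computes max a (5 if any error, else 4 if any warning, else 0)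
theorem pv_issue_fold (l : List (List (String × String))) (a : Int) (ha : 0 ≤ a) :
    l.foldl (fun a issue =>
      let sev := pvSeverity issue
      if sev == "error" then max a 5 else if sev == "warning" then max a 4 else a) a =
    max a (if l.any (fun i => pvSeverity i == "error") then 5
           else if l.any (fun i => pvSeverity i == "warning") then 4 else 0) := by
  induction l generalizing a with
  | nil => simp; omega
  | cons x xs ih =>
    simp only [List.foldl_cons]
    rw [ih]
    · by_cases he : pvSeverity x = "error" <;> by_cases hw : pvSeverity x = "warning" <;>
        simp [List.any_cons, he, hw] <;>
        first | (split_ifs <;> omega) | omega | simp_all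
    · split_ifs <;> omega

-- the status-rank lookup is the obvious 4-way branch
theorem pv_srank (s : String) :
    pvStatusRankDict.getD s 0 =
      (if s == "failed" then 3 else if s == "degraded" then 2 else if s == "ready" then 1 else 0) := by
  by_cases h1 : s = "failed"
  · subst h1; rfl
  · by_cases h2 : s = "degraded"
    · subst h2; rfl
    · by_cases h3 : s = "ready"
      · subst h3; rfl
      · have e1 : ("failed" == s) = false := beq_eq_false_iff_ne.mpr (Ne.symm h1)
        have e2 : ("degraded" == s) = false := beq_eq_false_iff_ne.mpr (Ne.symm h2)
        have e3 : ("ready" == s) = false := beq_eq_false_iff_ne.mpr (Ne.symm h3)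
        simp [pvStatusRankDict, PySem.Dict.getD, PySem.Dict.get?, List.find?, e1, e2, e3, h1, h2, h3]

-- the statuses fold computes max a (3 if failed, else 2 if degraded, else 1 if ready, else 0)
theorem pv_status_fold (l : List String) (a : Int) (ha : 0 ≤ a) :
    l.foldl (fun a s => max a (pvStatusRankDict.getD s 0)) a =
    max a (if l.any (fun s => s == "failed") then 3
           else if l.any (fun s => s == "degraded") then 2
           else if l.any (fun s => s == "ready") then 1 else 0) := by
  induction l generalizing a with
  | nil => simp; omega
  | cons x xs ih =>
    simp only [List.foldl_cons]
    rw [ih]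
    · rw [pv_srank]
      by_cases h1 : x = "failed" <;> by_cases h2 : x = "degraded" <;> by_cases h3 : x = "ready" <;>
        simp [List.any_cons, h1, h2, h3] <;>
        first | (split_ifs <;> omega) | omega | simp_all
    · exact le_trans ha (le_max_left _ _)

-- ===== VERDICT (by name: the statement is the Claim_ definition above) =====
theorem transport_test_status_py_spec : Claim_equal_transport_test_status_py := by
  intro transports issues _
  unfold Spec_transport_test_status_py transport_test_status_py transport_test_status_py_alt
  simp only [pv_equal_disabled, pv_contains_ofList]
  rw [pv_issue_fold issues 0 (le_refl 0), pv_status_fold _ _ (le_max_left _ _)]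
  set L := transports.map (fun item => pvNormStatus ((PySem.Dict.mk item).get? "status")) with hL
  by_cases hd : (!L.isEmpty && L.all (fun s => s == "disabled")) = true
  · simp [hd]
  · simp only [hd, if_false, Bool.false_eq_true]
    by_cases he : issues.any (fun i => pvSeverity i == "error") <;>
      by_cases hw : issues.any (fun i => pvSeverity i == "warning") <;>
        by_cases h1 : L.any (fun s => s == "failed") <;>
          by_cases h2 : L.any (fun s => s == "degraded") <;>
            by_cases h3 : L.any (fun s => s == "ready") <;>
              simp [he, hw, h1, h2, h3, pvResultTable, PySem.List.pyGet?, PySem.List.pyIdx?]
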